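-- pv_equiv track=rewrite | github.com/jhoppo/leetcoder | PrintSquare.py | PrintSquare
-- ===== SOURCE A (Python) =====
-- def PrintSquare(n,s):
--     emptyArray = [ [ '' for i in range(n) ] for i in range(n) ]
--     for i in range(n):
--         for j in range(n):
--             if i == 0 or i == n-1 :
--                 emptyArray[i][j] = s
--             elif j == 0 or j == n-1 :
--                 emptyArray[i][j] =s
--             else:
--                 emptyArray[i][j] = " "
--     return emptyArray
-- ===== SOURCE B (Python) =====
-- def PrintSquare(n, s):
--     result = []
--     for i in range(n):
--         if i == 0 or i == n - 1:
--             result.append([s] * n)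
--         else:
--             result.append([s] + [" "] * (n - 2) + [s])
--     return result
-- ===== Notes on version B (the rewrite author's own statement) =====
-- stated objective: simpler
-- what changed: B builds each row as a whole ([s]*n for border rows, [s]+[' ']*(n-2)+[s] for interior rows) in a single loop over rows, instead of A's pre-allocated n*n grid mutated cell by cell in nested loops with a per-cell branch.
import Mathlib
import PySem

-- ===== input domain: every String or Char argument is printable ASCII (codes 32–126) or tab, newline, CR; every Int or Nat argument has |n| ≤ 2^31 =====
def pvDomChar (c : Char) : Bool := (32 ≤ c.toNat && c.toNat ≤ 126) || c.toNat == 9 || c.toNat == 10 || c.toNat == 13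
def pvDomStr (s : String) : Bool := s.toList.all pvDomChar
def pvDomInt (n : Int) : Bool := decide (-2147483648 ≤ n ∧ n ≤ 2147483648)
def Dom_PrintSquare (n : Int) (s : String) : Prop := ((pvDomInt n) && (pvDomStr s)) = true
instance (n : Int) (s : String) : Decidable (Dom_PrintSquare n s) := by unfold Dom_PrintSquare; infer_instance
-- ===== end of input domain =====

-- B builds each row as a whole in a single loop over rows instead of A's cell-by-cell
-- mutation of a pre-allocated n×n grid in nested loops (objective: simpler).

-- ===== PORT A =====
-- literal transliteration of A: pre-allocated grid, nested index loops, per-cell branch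
def PrintSquare (n : Int) (s : String) : List (List String) :=
  let emptyArray : List (List String) :=
    (PySem.List.pyRange 0 n).map (fun _ => (PySem.List.pyRange 0 n).map (fun _ => ""))
  (PySem.List.pyRange 0 n).foldl (fun arr i =>
    (PySem.List.pyRange 0 n).foldl (fun arr j =>
      arr.modify i.toNat (fun row =>
        row.set j.toNat
          (if i = 0 ∨ i = n - 1 then s
           else if j = 0 ∨ j = n - 1 then s
           else " "))) arr) emptyArray

-- ===== PORT B =====
-- literal transliteration of B: one loop over rows, each row appended whole
def PrintSquare_alt (n : Int) (s : String) : List (List String) :=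
  (PySem.List.pyRange 0 n).foldl (fun result i =>
    result ++ [if i = 0 ∨ i = n - 1 then List.replicate n.toNat s
               else [s] ++ List.replicate (n - 2).toNat " " ++ [s]]) []

-- ===== PRECONDITION & SPEC =====
def Spec_PrintSquare (n : Int) (s : String) (out : List (List String)) : Prop := out = PrintSquare_alt n s
instance (n : Int) (s : String) (out : List (List String)) : Decidable (Spec_PrintSquare n s out) := by unfold Spec_PrintSquare; infer_instance

-- ===== CLAIM (what is proved, stated in full; the proofs are below) =====
def Claim_equal_PrintSquare : Prop := ∀ (n : Int) (s : String), Dom_PrintSquare n s → Spec_PrintSquare n s (PrintSquare n s)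

-- ===== LEMMAS AND PROOFS =====

-- appending singletons in a fold is mapping
theorem pvFoldlAppend {α β : Type} (f : β → α) (l : List β) (acc : List α) :
    l.foldl (fun a x => a ++ [f x]) acc = acc ++ l.map f := by
  induction l generalizing acc with
  | nil => simp
  | cons x l ih => simp [List.foldl_cons, ih]

-- a fold of modifies at one fixed index is a single modify by the folded function
theorem pvFoldlModify {α β : Type} (k : Nat) (g : β → α → α) (l : List β) (arr : List α) :
    l.foldl (fun a j => a.modify k (g j)) arr
      = arr.modify k (fun r => l.foldl (fun r j => g j r) r) := by
  induction l generalizing arr with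
  | nil => exact (List.modify_id _ _).symm
  | cons j l ih =>
    simp only [List.foldl_cons]
    rw [ih, List.modify_modify_eq]
    rfl

-- filling indices 0..k-1 of a list by set yields the mapped prefix
theorem pvGenFill {α : Type} (f : Nat → α) (k : Nat) (r : List α) (h : k ≤ r.length) :
    (List.range k).foldl (fun a i => a.set i (f i)) r = (List.range k).map f ++ r.drop k := by
  induction k with
  | zero => simp
  | succ k ih =>
    have hk : k < r.length := by omega
    rw [List.range_succ, List.foldl_append, ih (by omega), List.foldl_cons, List.foldl_nil,
      List.set_append, List.drop_eq_getElem_cons hk]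
    simp only [List.length_map, List.length_range, lt_irrefl, if_false, Nat.sub_self, List.set_cons_zero,
      List.map_append, List.map_cons, List.map_nil, List.append_assoc,
      List.cons_append, List.nil_append]

-- filling a whole row of length n.toNat with per-index values
theorem pvRowFill (n : Int) (v : Int → String) (r : List String) (h : r.length = n.toNat) :
    (PySem.List.pyRange 0 n).foldl (fun a j => a.set j.toNat (v j)) r
      = List.map (fun k : Nat => v (k : Int)) (List.range n.toNat) := by
  rcases le_or_gt n 0 with hn | hn
  · rw [PySem.List.pyRange_one_eq_nil hn]
    have : n.toNat = 0 := by omega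
    rw [this] at h ⊢
    simp [List.eq_nil_of_length_eq_zero h]
  · have hcast : n = ((n.toNat : Nat) : Int) := by omega
    rw [hcast, PySem.List.pyRange_zero_nat, List.foldl_map]
    simp only [Int.toNat_natCast]
    rw [pvGenFill _ _ _ (le_of_eq h.symm), ← h, List.drop_length, List.append_nil]

-- outer loop: each modify with a row-rebuilding function equals a set with the final row
theorem pvOuterConv (m : Nat) (F : Int → List String → List String) (c : Int → List String)
    (hF : ∀ i (r : List String), r.length = m → F i r = c i)
    (hc : ∀ i, (c i).length = m)
    (l : List Int) (arr : List (List String)) (hinv : ∀ row ∈ arr, row.length = m) :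
    l.foldl (fun a i => a.modify i.toNat (F i)) arr
      = l.foldl (fun a i => a.set i.toNat (c i)) arr := by
  induction l generalizing arr with
  | nil => rfl
  | cons i l ih =>
    have hstep : arr.modify i.toNat (F i) = arr.set i.toNat (c i) := by
      rw [List.modify_eq_set_getElem?]
      cases hg : arr[i.toNat]? with
      | none =>
        have : arr.length ≤ i.toNat := List.getElem?_eq_none_iff.mp hg
        simp [List.set_eq_of_length_le this]
      | some r =>
        have := hF i r (hinv r (List.mem_of_getElem? hg))
        simp [this]
    rw [List.foldl_cons, List.foldl_cons, hstep]
    apply ih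
    intro row hrow
    rcases List.mem_or_eq_of_mem_set hrow with h | h
    · exact hinv row h
    · rw [h]; exact hc i

-- one row of A's final grid equals B's row, for row index k < n
theorem pvRowEq (n : Int) (s : String) (k : Nat) (hk : k < n.toNat) :
    List.map (fun j : Nat =>
        if (k : Int) = 0 ∨ (k : Int) = n - 1 then s
        else if (j : Int) = 0 ∨ (j : Int) = n - 1 then s
        else " ") (List.range n.toNat)
      = (if (k : Int) = 0 ∨ (k : Int) = n - 1 then List.replicate n.toNat s
         else [s] ++ List.replicate (n - 2).toNat " " ++ [s]) := by
  by_cases hb : (k : Int) = 0 ∨ (k : Int) = n - 1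
  · rw [if_pos hb, List.map_congr_left (fun (j : Nat) _ => if_pos hb)]
    simp
  · simp only [hb, if_false]
    have hn3 : 3 ≤ n := by omega
    apply List.ext_getElem
    · simp; omega
    · intro j hj hj'
      simp only [List.length_map, List.length_range, List.length_append, List.length_cons,
        List.length_replicate, List.length_nil] at hj hj'
      simp only [List.getElem_map, List.getElem_range, List.cons_append, List.nil_append,
        List.getElem_cons, List.getElem_append, List.getElem_replicate, List.length_replicate]
      split_ifs <;> first | rfl | (exfalso; omega)

-- ===== VERDICT (by name: the statement is the Claim_ definition above) =====
theorem PrintSquare_spec : Claim_equal_PrintSquare := by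
  intro n s _
  unfold Spec_PrintSquare PrintSquare PrintSquare_alt
  rw [pvFoldlAppend, List.nil_append]
  rcases le_or_gt n 0 with hn | hn
  · rw [PySem.List.pyRange_one_eq_nil hn]; rfl
  · -- rewrite A's inner loop as a single modify per row
    have hinner : ∀ (arr : List (List String)) (i : Int),
        (PySem.List.pyRange 0 n).foldl (fun arr j =>
          arr.modify i.toNat (fun row =>
            row.set j.toNat
              (if i = 0 ∨ i = n - 1 then s
               else if j = 0 ∨ j = n - 1 then s
               else " "))) arr
        = arr.modify i.toNat (fun r =>
            (PySem.List.pyRange 0 n).foldl (fun r j =>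
              r.set j.toNat
                (if i = 0 ∨ i = n - 1 then s
                 else if j = 0 ∨ j = n - 1 then s
                 else " ")) r) := by
      intro arr i
      exact pvFoldlModify i.toNat _ _ arr
    simp only [hinner]
    set m := n.toNat with hm
    set c : Int → List String := fun i =>
      List.map (fun j : Nat =>
        if i = 0 ∨ i = n - 1 then s
        else if (j : Int) = 0 ∨ (j : Int) = n - 1 then s
        else " ") (List.range m) with hcdef
    have hcast : n = ((m : Nat) : Int) := by omega
    have hrowlen : ((PySem.List.pyRange 0 n).map (fun _ => ("" : String))).length = m := by
      simp [PySem.List.length_pyRange_one, hm]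
    have hinv : ∀ row ∈ ((PySem.List.pyRange 0 n).map
        fun _ => (PySem.List.pyRange 0 n).map (fun _ => ("" : String))), row.length = m := by
      intro row hrow
      obtain ⟨a, _, hrw⟩ := List.mem_map.mp hrow
      rw [← hrw]
      exact hrowlen
    rw [pvOuterConv m _ c
      (fun i r hr => pvRowFill n _ r (hr.trans hm))
      (fun i => by simp [hcdef])
      _ _ hinv]
    -- both sides are now maps over range m
    rw [hcast, PySem.List.pyRange_zero_nat, List.foldl_map]
    simp only [Int.toNat_natCast]
    rw [pvGenFill (fun k : Nat => c (k : Int)) m _ (by simp),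
      List.drop_eq_nil_of_le (by simp), List.append_nil, List.map_map]
    apply List.map_congr_left
    intro k hkmem
    have hk : k < m := List.mem_range.mp hkmem
    have h := pvRowEq n s k (by omega)
    simp only [hcdef, Function.comp_apply]
    rw [hcast] at h ⊢
    simpa using h
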